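-- pv_equiv track=rewrite | github.com/osercinoglu/grinn | grinn_workflow.py | estimate_molecule_residues
-- ===== SOURCE A (Python) =====
-- def estimate_molecule_residues(content, mol_name, logger=None):
--     """
--     Estimate the number of residues in a molecule by looking for its definition
--     in the topology file.
--
--     Returns:
--     - int: Estimated number of residues (defaults to 1 for unknown molecules)
--     """
--     try:
--         # Look for molecule definition section
--         in_molecule_section = False
--         residue_count = 0
--
--         for line in content.split('\n'):
--             line = line.strip()
--
--             # Check if we're entering the molecule definition
--             if line == f'[ moleculetype ]':
--                 in_molecule_section = 'search_name'
--                 continue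
--             elif in_molecule_section == 'search_name':
--                 # Next non-comment line should have molecule name
--                 if not line.startswith(';') and line:
--                     parts = line.split()
--                     if parts and parts[0] == mol_name:
--                         in_molecule_section = 'in_molecule'
--                     else:
--                         in_molecule_section = False
--                 continue
--             elif in_molecule_section == 'in_molecule':
--                 # Look for atoms section to count residues
--                 if line.startswith('[ atoms ]'):
--                     in_molecule_section = 'counting_atoms'
--                     continue
--                 elif line.startswith('['):
--                     # Entered a different section, stop counting
--                     break
--             elif in_molecule_section == 'counting_atoms':
--                 if line.startswith('['):
--                     # End of atoms section
--                     break
--                 elif line and not line.startswith(';'):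
--                     # This is an atom line, extract residue info
--                     parts = line.split()
--                     if len(parts) >= 4:  # atom_nr, atom_type, residue_nr, residue_name
--                         try:
--                             res_nr = int(parts[2])
--                             residue_count = max(residue_count, res_nr)
--                         except (ValueError, IndexError):
--                             continue
--
--         return max(1, residue_count)  # At least 1 residue
--
--     except Exception as e:
--         if logger:
--             logger.debug(f"Could not estimate residues for molecule {mol_name}: {str(e)}")
--         return 1  # Default fallback
-- ===== SOURCE B (Python) =====
-- def estimate_molecule_residues(content, mol_name, logger=None):
--     """Estimate a molecule's residue count from topology file content.
--
--     The file is first cut into '[ moleculetype ]' blocks; each block is then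
--     scanned on its own: read the molecule name, locate the block's
--     '[ atoms ]' section and take the largest residue number found there.
--     Always at least 1.
--     """
--     lines = [line.strip() for line in content.split('\n')]
--     chunks = []
--     for line in lines:
--         if line == '[ moleculetype ]':
--             chunks.append([])
--         elif chunks:
--             chunks[-1].append(line)
--     best = 0
--     for chunk in chunks:
--         best, keep_going = _scan_block(chunk, mol_name, best)
--         if not keep_going:
--             break
--     return max(1, best)
--
--
-- def _scan_block(chunk, mol_name, best):
--     """Scan one moleculetype block; return (best, scan_further_blocks)."""
--     it = iter(chunk)
--     # the first non-blank, non-comment line names the molecule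
--     for line in it:
--         if line and not line.startswith(';'):
--             parts = line.split()
--             if not parts or parts[0] != mol_name:
--                 return best, True
--             break
--     else:
--         return best, True
--     # locate the block's first section header
--     for line in it:
--         if line.startswith('['):
--             if not line.startswith('[ atoms ]'):
--                 return best, False
--             break
--     else:
--         return best, True
--     # take the maximum residue number over the atom lines
--     for line in it:
--         if line.startswith('['):
--             return best, False
--         if not line.startswith(';'):
--             parts = line.split()
--             if len(parts) >= 4:
--                 try:
--                     best = max(best, int(parts[2]))
--                 except ValueError:
--                     pass
--     return best, True
-- ===== Notes on version B (the rewrite author's own statement) =====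
-- stated objective: alternative
-- what changed: Replaces A's single for-loop driven by a four-valued state variable with a two-phase design: first cut the stripped lines into '[ moleculetype ]' blocks, then scan each block independently (name line, section header, atom lines) with a keep-scanning flag.
import Mathlib
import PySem

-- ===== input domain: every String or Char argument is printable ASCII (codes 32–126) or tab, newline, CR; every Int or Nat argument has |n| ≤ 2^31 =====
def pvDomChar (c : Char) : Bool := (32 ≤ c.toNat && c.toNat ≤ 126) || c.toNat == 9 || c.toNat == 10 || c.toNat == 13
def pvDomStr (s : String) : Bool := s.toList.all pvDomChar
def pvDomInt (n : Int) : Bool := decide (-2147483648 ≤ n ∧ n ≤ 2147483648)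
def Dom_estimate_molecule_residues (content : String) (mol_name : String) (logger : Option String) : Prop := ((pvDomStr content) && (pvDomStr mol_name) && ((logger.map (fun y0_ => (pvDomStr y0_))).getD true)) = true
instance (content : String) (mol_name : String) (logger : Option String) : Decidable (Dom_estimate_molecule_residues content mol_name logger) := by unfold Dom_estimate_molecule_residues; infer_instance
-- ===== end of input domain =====

-- B cuts the file into '[ moleculetype ]' blocks first and then scans each block on its
-- own (objective: alternative decomposition, same cost); return values proved equal on all
-- inputs (A's try/except never fires; logger is only used in the dead except branch).

-- ===== PORT A =====
-- A's state: False / 'search_name' / 'in_molecule' / 'counting_atoms'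
inductive PvAState | off | searchName | inMolecule | counting
deriving DecidableEq, Repr

-- the residue update of one atom line
def pvAtomUpd (line : String) (cnt : Int) : Int :=
  if line ≠ "" ∧ ¬ PySem.Str.startswith line ";" then
    let parts := PySem.Str.split₀ line
    if parts.length ≥ 4 then
      match PySem.Int.ofStr? (parts.getD 2 "") with
      | some n => max cnt n
      | none => cnt
    else cnt
  else cnt

-- A's for-loop, one step per raw line (strips inside, like A)
def pvALoop (mol_name : String) : List String → PvAState → Int → Int
  | [], _, cnt => max 1 cnt
  | l :: rest, st, cnt =>
    let line := PySem.Str.strip l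
    if line = "[ moleculetype ]" then pvALoop mol_name rest .searchName cnt
    else match st with
      | .searchName =>
        if ¬ PySem.Str.startswith line ";" ∧ line ≠ "" then
          let parts := PySem.Str.split₀ line
          if parts ≠ [] ∧ parts.headD "" = mol_name then pvALoop mol_name rest .inMolecule cnt
          else pvALoop mol_name rest .off cnt
        else pvALoop mol_name rest .searchName cnt
      | .inMolecule =>
        if PySem.Str.startswith line "[ atoms ]" then pvALoop mol_name rest .counting cnt
        else if PySem.Str.startswith line "[" then max 1 cnt   -- break
        else pvALoop mol_name rest .inMolecule cnt
      | .counting =>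
        if PySem.Str.startswith line "[" then max 1 cnt        -- break
        else pvALoop mol_name rest .counting (pvAtomUpd line cnt)
      | .off => pvALoop mol_name rest .off cnt

def estimate_molecule_residues (content : String) (mol_name : String) (logger : Option String) : Int :=
  pvALoop mol_name ((PySem.Str.split? content "\n").getD []) .off 0

-- ===== PORT B =====
-- B's atom-line update (the body of _scan_block's third loop)
def pvUpd (line : String) (best : Int) : Int :=
  if ¬ PySem.Str.startswith line ";" then
    let parts := PySem.Str.split₀ line
    if parts.length ≥ 4 then
      match PySem.Int.ofStr? (parts.getD 2 "") with
      | some n => max best n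
      | none => best
    else best
  else best

-- _scan_block's third loop: maximum residue number over the atom lines
def pvAtomLoop (chunk : List String) (best : Int) : Int × Bool :=
  match chunk with
  | [] => (best, true)
  | l :: t => if PySem.Str.startswith l "[" then (best, false) else pvAtomLoop t (pvUpd l best)

-- _scan_block's second loop: locate the block's first section header
def pvSectLoop (chunk : List String) (best : Int) : Int × Bool :=
  match chunk with
  | [] => (best, true)
  | l :: t =>
    if PySem.Str.startswith l "[" then
      if ¬ PySem.Str.startswith l "[ atoms ]" then (best, false) else pvAtomLoop t best
    else pvSectLoop t best

-- _scan_block's first loop: the first non-blank, non-comment line names the molecule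
def pvNameLoop (mol_name : String) (chunk : List String) (best : Int) : Int × Bool :=
  match chunk with
  | [] => (best, true)
  | l :: t =>
    if l ≠ "" ∧ ¬ PySem.Str.startswith l ";" then
      let parts := PySem.Str.split₀ l
      if parts = [] ∨ parts.headD "" ≠ mol_name then (best, true) else pvSectLoop t best
    else pvNameLoop mol_name t best

def pvScanBlock (mol_name : String) (chunk : List String) (best : Int) : Int × Bool :=
  pvNameLoop mol_name chunk best

-- Source B's chunk-building loop (reversed-accumulator transcription of append/append-to-last)
def pvBuildChunks : List String → List (List String) → List (List String)
  | [], acc => (acc.map List.reverse).reverse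
  | l :: rest, acc =>
    if l = "[ moleculetype ]" then pvBuildChunks rest ([] :: acc)
    else match acc with
      | [] => pvBuildChunks rest []
      | c :: cs => pvBuildChunks rest ((l :: c) :: cs)

-- Source B's for-chunk loop with its keep_going flag
def pvProc (mol_name : String) : List (List String) → Int → Int
  | [], best => max 1 best
  | c :: cs, best =>
    match pvScanBlock mol_name c best with
    | (b, true) => pvProc mol_name cs b
    | (b, false) => max 1 b

def estimate_molecule_residues_alt (content : String) (mol_name : String) (logger : Option String) : Int :=
  let lines := ((PySem.Str.split? content "\n").getD []).map PySem.Str.strip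
  pvProc mol_name (pvBuildChunks lines []) 0

-- ===== PRECONDITION & SPEC =====
def Spec_estimate_molecule_residues (content : String) (mol_name : String) (logger : Option String) (out : Int) : Prop := out = estimate_molecule_residues_alt content mol_name logger
instance (content : String) (mol_name : String) (logger : Option String) (out : Int) : Decidable (Spec_estimate_molecule_residues content mol_name logger out) := by unfold Spec_estimate_molecule_residues; infer_instance

-- ===== CLAIM (what is proved, stated in full; the proofs are below) =====
def Claim_equal_estimate_molecule_residues : Prop := ∀ (content : String) (mol_name : String) (logger : Option String), Dom_estimate_molecule_residues content mol_name logger → Spec_estimate_molecule_residues content mol_name logger (estimate_molecule_residues content mol_name logger)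

-- ===== LEMMAS AND PROOFS =====

-- Proof-side phase functions: A's four states rewritten as four mutually
-- recursive functions over the pre-stripped line list.
mutual
def pvB1 (mol_name : String) (ls : List String) (best : Int) : Int :=
  match ls with
  | [] => max 1 best
  | l :: rest => if l = "[ moleculetype ]" then pvB2 mol_name rest best else pvB1 mol_name rest best
termination_by ls.length
def pvB2 (mol_name : String) (ls : List String) (best : Int) : Int :=
  match ls with
  | [] => max 1 best
  | l :: rest =>
    if l = "" ∨ PySem.Str.startswith l ";" ∨ l = "[ moleculetype ]" then pvB2 mol_name rest best
    else
      let parts := PySem.Str.split₀ l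
      if parts = [] ∨ ¬ parts.headD "" = mol_name then pvB1 mol_name rest best
      else pvB3 mol_name rest best
termination_by ls.length
def pvB3 (mol_name : String) (ls : List String) (best : Int) : Int :=
  match ls with
  | [] => max 1 best
  | l :: rest =>
    if ¬ PySem.Str.startswith l "[" then pvB3 mol_name rest best
    else if l = "[ moleculetype ]" then pvB2 mol_name rest best
    else if PySem.Str.startswith l "[ atoms ]" then pvB4 mol_name rest best
    else max 1 best
termination_by ls.length
def pvB4 (mol_name : String) (ls : List String) (best : Int) : Int :=
  match ls with
  | [] => max 1 best
  | l :: rest =>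
    if ¬ PySem.Str.startswith l "[" then pvB4 mol_name rest (pvUpd l best)
    else if l = "[ moleculetype ]" then pvB2 mol_name rest best
    else max 1 best
termination_by ls.length
end

def pvPhase (mol_name : String) : PvAState → List String → Int → Int
  | .off => pvB1 mol_name
  | .searchName => pvB2 mol_name
  | .inMolecule => pvB3 mol_name
  | .counting => pvB4 mol_name

lemma pvUpd_eq_pvAtomUpd (l : String) (b : Int) : pvUpd l b = pvAtomUpd l b := by
  by_cases h : l = ""
  · subst h
    have h0 : PySem.Str.split₀ "" = [] := by decide
    simp [pvUpd, pvAtomUpd, h0]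
  · simp [pvUpd, pvAtomUpd, h]

lemma startswith_bracket_of_atoms {l : String} (h : PySem.Str.startswith l "[ atoms ]" = true) :
    PySem.Str.startswith l "[" = true := by
  rw [PySem.Str.startswith_eq] at *
  rw [PySem.Chars.startswith_iff] at *
  exact List.IsPrefix.trans (by decide) h

lemma pvALoop_eq_phase (mol_name : String) (ls : List String) (st : PvAState) (cnt : Int) :
    pvALoop mol_name ls st cnt = pvPhase mol_name st (ls.map PySem.Str.strip) cnt := by
  induction ls generalizing st cnt with
  | nil => cases st <;> simp [pvALoop, pvPhase, pvB1, pvB2, pvB3, pvB4]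
  | cons l rest ih =>
    simp only [List.map_cons]
    by_cases hh : PySem.Str.strip l = "[ moleculetype ]"
    · have h1 : PySem.Chars.startswith
          ['[', ' ', 'm', 'o', 'l', 'e', 'c', 'u', 'l', 'e', 't', 'y', 'p', 'e', ' ', ']'] ['['] = true := by decide
      cases st <;>
        simp [pvALoop, pvPhase, pvB1, pvB2, pvB3, pvB4, hh, h1, ih]
    · cases st with
      | off => simp [pvALoop, pvPhase, pvB1, hh, ih]
      | searchName =>
        by_cases hsc : PySem.Str.startswith (PySem.Str.strip l) ";" = true
        · have hsc' := hsc; simp at hsc'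
          simp [pvALoop, pvPhase, pvB2, hh, hsc', ih]
        · have hsc' := hsc; simp at hsc'
          by_cases hemp : PySem.Str.strip l = ""
          · simp [pvALoop, pvPhase, pvB2, hemp, ih]
          · by_cases hp : PySem.Str.split₀ (PySem.Str.strip l) = []
            · simp [pvALoop, pvPhase, pvB2, hh, hemp, hsc', hp, ih]
            · simp [pvALoop, pvPhase, pvB2, hh, hemp, hsc', hp, ih]
      | inMolecule =>
        by_cases ha : PySem.Str.startswith (PySem.Str.strip l) "[ atoms ]" = true
        · have hbr := startswith_bracket_of_atoms ha
          simp at ha hbr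
          simp [pvALoop, pvPhase, pvB3, hh, ha, hbr, ih]
        · by_cases hbr : PySem.Str.startswith (PySem.Str.strip l) "[" = true
          all_goals simp at ha hbr
          · simp [pvALoop, pvPhase, pvB3, hh, ha, hbr]
          · simp [pvALoop, pvPhase, pvB3, hh, ha, hbr, ih]
      | counting =>
        by_cases hbr : PySem.Str.startswith (PySem.Str.strip l) "[" = true
        all_goals simp at hbr
        · simp [pvALoop, pvPhase, pvB4, hh, hbr]
        · simp [pvALoop, pvPhase, pvB4, pvUpd_eq_pvAtomUpd, hh, hbr, ih]

-- Spec-level chunking (what pvBuildChunks computes)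
def pvNotHdr (x : String) : Bool := x ≠ "[ moleculetype ]"

def pvChunksOf : List String → List (List String)
  | [] => []
  | l :: t =>
    if l = "[ moleculetype ]" then
      (t.takeWhile pvNotHdr) :: pvChunksOf (t.dropWhile pvNotHdr)
    else pvChunksOf t
termination_by ls => ls.length
decreasing_by
  · simpa using Nat.lt_succ_of_le (t.length_dropWhile_le _)
  · simp

def pvCont (mol_name : String) : Int × Bool → List String → Int
  | (b, true), rest => pvProc mol_name (pvChunksOf rest) b
  | (b, false), _ => max 1 b

lemma pvBuildChunks_cons (r : List String) (c : List String) (cs : List (List String)) :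
    pvBuildChunks r (c :: cs) =
      (cs.map List.reverse).reverse ++
        (c.reverse ++ r.takeWhile pvNotHdr) ::
          pvChunksOf (r.dropWhile pvNotHdr) := by
  induction r generalizing c cs with
  | nil => simp [pvBuildChunks, pvChunksOf]
  | cons l t ih =>
    by_cases h : l = "[ moleculetype ]"
    · subst h
      simp [pvBuildChunks, ih, pvChunksOf, List.takeWhile, List.dropWhile, pvNotHdr]
    · simp [pvBuildChunks, h, ih, List.takeWhile, List.dropWhile, pvNotHdr]

lemma pvBuildChunks_eq (r : List String) : pvBuildChunks r [] = pvChunksOf r := by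
  induction r with
  | nil => simp [pvBuildChunks, pvChunksOf]
  | cons l t ih =>
    by_cases h : l = "[ moleculetype ]"
    · subst h
      simp [pvBuildChunks, pvBuildChunks_cons, pvChunksOf]
    · simp [pvBuildChunks, h, ih, pvChunksOf]

lemma pvChunksOf_dropWhile (r : List String) :
    pvChunksOf (r.dropWhile pvNotHdr) = pvChunksOf r := by
  induction r with
  | nil => rfl
  | cons l t ih =>
    by_cases h : l = "[ moleculetype ]"
    · subst h; simp [List.dropWhile, pvNotHdr]
    · simp [List.dropWhile, h, ih, pvChunksOf, pvNotHdr]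

-- The main bridge: each of A's phases equals the corresponding stage of B's
-- block-by-block scan.
lemma pvPhases_chunks (mol : String) (r : List String) :
    (∀ b, pvB1 mol r b = pvProc mol (pvChunksOf r) b) ∧
    (∀ b, pvB2 mol r b =
      pvCont mol (pvNameLoop mol (r.takeWhile pvNotHdr) b)
        (r.dropWhile pvNotHdr)) ∧
    (∀ b, pvB3 mol r b =
      pvCont mol (pvSectLoop (r.takeWhile pvNotHdr) b)
        (r.dropWhile pvNotHdr)) ∧
    (∀ b, pvB4 mol r b =
      pvCont mol (pvAtomLoop (r.takeWhile pvNotHdr) b)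
        (r.dropWhile pvNotHdr)) := by
  induction r with
  | nil =>
    refine ⟨?_, ?_, ?_, ?_⟩ <;> intro b <;>
      simp [pvB1, pvB2, pvB3, pvB4, pvProc, pvCont, pvNameLoop, pvSectLoop, pvAtomLoop, pvChunksOf]
  | cons l t ih =>
    obtain ⟨ih1, ih2, ih3, ih4⟩ := ih
    by_cases hh : l = "[ moleculetype ]"
    · subst hh
      have hC : pvChunksOf ("[ moleculetype ]" :: t)
          = (t.takeWhile pvNotHdr) ::
              pvChunksOf (t.dropWhile pvNotHdr) := by
        simp [pvChunksOf]
      have hMain : ∀ b, pvB2 mol t b = pvProc mol (pvChunksOf ("[ moleculetype ]" :: t)) b := by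
        intro b
        rw [hC, ih2 b]
        cases hn : pvNameLoop mol (t.takeWhile pvNotHdr) b with
        | mk b' k => cases k <;> simp [pvCont, pvProc, pvScanBlock, hn]
      have hb : PySem.Chars.startswith
          ['[', ' ', 'm', 'o', 'l', 'e', 'c', 'u', 'l', 'e', 't', 'y', 'p', 'e', ' ', ']'] ['['] = true := by decide
      have htk : (("[ moleculetype ]" :: t).takeWhile pvNotHdr) = ([] : List String) := by
        simp [List.takeWhile, pvNotHdr]
      have hdp : (("[ moleculetype ]" :: t).dropWhile pvNotHdr)
          = "[ moleculetype ]" :: t := by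
        simp [List.dropWhile, pvNotHdr]
      refine ⟨?_, ?_, ?_, ?_⟩ <;> intro b
      · simpa [pvB1] using hMain b
      · rw [htk, hdp]
        have h2 : pvB2 mol ("[ moleculetype ]" :: t) b = pvB2 mol t b := by simp [pvB2]
        rw [h2, hMain b]
        simp [pvNameLoop, pvCont]
      · rw [htk, hdp]
        have h3 : pvB3 mol ("[ moleculetype ]" :: t) b = pvB2 mol t b := by
          simp [pvB3, hb]
        rw [h3, hMain b]
        simp [pvSectLoop, pvCont]
      · rw [htk, hdp]
        have h4 : pvB4 mol ("[ moleculetype ]" :: t) b = pvB2 mol t b := by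
          simp [pvB4, hb]
        rw [h4, hMain b]
        simp [pvAtomLoop, pvCont]
    · have htake : (l :: t).takeWhile pvNotHdr
          = l :: t.takeWhile pvNotHdr := by
        simp [List.takeWhile, pvNotHdr, hh]
      have hdrop : (l :: t).dropWhile pvNotHdr
          = t.dropWhile pvNotHdr := by
        simp [List.dropWhile, pvNotHdr, hh]
      refine ⟨?_, ?_, ?_, ?_⟩ <;> intro b
      · simp [pvB1, hh, ih1, pvChunksOf]
      · rw [htake, hdrop]
        by_cases hskip : l = "" ∨ PySem.Str.startswith l ";" = true
        · have hthis : pvNameLoop mol (l :: t.takeWhile pvNotHdr) b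
              = pvNameLoop mol (t.takeWhile pvNotHdr) b := by
            rcases hskip with h1 | h1
            · simp [pvNameLoop, h1]
            · have h1' : PySem.Chars.startswith l.toList [';'] = true := by simpa using h1
              simp [pvNameLoop, h1']
          rw [hthis, ← ih2 b]
          rcases hskip with h1 | h1
          · simp [pvB2, h1]
          · have h1' : PySem.Chars.startswith l.toList [';'] = true := by simpa using h1
            simp [pvB2, h1']
        · push_neg at hskip
          obtain ⟨hne, hnc⟩ := hskip
          simp only [Bool.not_eq_true] at hnc
          have hnc' : PySem.Chars.startswith l.toList [';'] = false := by simpa using hnc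
          by_cases hm0 : PySem.Str.split₀ l = []
          · simp [pvB2, pvNameLoop, pvCont, hne, hnc', hh, hm0, ih1, pvChunksOf_dropWhile]
          · by_cases hm1 : (PySem.Str.split₀ l).head?.getD "" = mol
            · simp [pvB2, pvNameLoop, hne, hnc', hh, hm0, hm1, ih3 b]
            · simp [pvB2, pvNameLoop, pvCont, hne, hnc', hh, hm0, hm1, ih1, pvChunksOf_dropWhile]
      · rw [htake, hdrop]
        by_cases hbr : PySem.Str.startswith l "[" = true
        · have hbr' : PySem.Chars.startswith l.toList ['['] = true := by simpa using hbr
          by_cases ha : PySem.Str.startswith l "[ atoms ]" = true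
          · have ha' : PySem.Chars.startswith l.toList ['[', ' ', 'a', 't', 'o', 'm', 's', ' ', ']'] = true := by
              simpa using ha
            simp [pvB3, pvSectLoop, hbr', hh, ha', ih4 b]
          · have ha' : PySem.Chars.startswith l.toList ['[', ' ', 'a', 't', 'o', 'm', 's', ' ', ']'] = false := by
              simpa using ha
            simp [pvB3, pvSectLoop, pvCont, hbr', hh, ha']
        · have hbr' : PySem.Chars.startswith l.toList ['['] = false := by simpa using hbr
          simp [pvB3, pvSectLoop, hbr', ih3 b]
      · rw [htake, hdrop]
        by_cases hbr : PySem.Str.startswith l "[" = true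
        · have hbr' : PySem.Chars.startswith l.toList ['['] = true := by simpa using hbr
          simp [pvB4, pvAtomLoop, pvCont, hbr', hh]
        · have hbr' : PySem.Chars.startswith l.toList ['['] = false := by simpa using hbr
          simp [pvB4, pvAtomLoop, hbr', ih4 (pvUpd l b)]

-- ===== VERDICT (by name: the statement is the Claim_ definition above) =====
theorem estimate_molecule_residues_spec : Claim_equal_estimate_molecule_residues := by
  intro content mol_name logger _
  unfold Spec_estimate_molecule_residues estimate_molecule_residues estimate_molecule_residues_alt
  rw [pvALoop_eq_phase]
  show pvPhase mol_name .off (((PySem.Str.split? content "\n").getD []).map PySem.Str.strip) 0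
      = pvProc mol_name
          (pvBuildChunks (((PySem.Str.split? content "\n").getD []).map PySem.Str.strip) []) 0
  rw [pvBuildChunks_eq]
  exact (pvPhases_chunks mol_name _).1 0
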